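-- pv_equiv track=rewrite | github.com/drapala/transactionify | packages/cli/src/dx/commands/local.py | _services_healthy
-- ===== SOURCE A (Python) =====
-- def _services_healthy(payload: dict) -> bool:
--     """Healthy when every NOT-disabled service reports running/available.
--
--     LocalStack's /_localstack/health returns the full catalog (~30 services)
--     with most marked 'disabled' (we only enabled SERVICES=dynamodb in
--     docker-compose.yml). A naive `all(running)` over the whole dict would
--     never be True. Filter disabled out, then require at least one enabled
--     service to be running.
--     """
--     services = payload.get("services") if isinstance(payload, dict) else None
--     if not services:
--         return False
--     enabled = {k: v for k, v in services.items() if v != "disabled"}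
--     if not enabled:
--         return False
--     return all(v in ("running", "available") for v in enabled.values())
-- ===== SOURCE B (Python) =====
-- def _services_healthy(payload: dict) -> bool:
--     services = payload.get("services") if isinstance(payload, dict) else None
--     if not services:
--         return False
--     statuses = set(services.values())
--     return bool(statuses & {"running", "available"}) and statuses <= {"disabled", "running", "available"}
-- ===== Notes on version B (the rewrite author's own statement) =====
-- stated objective: simpler
-- what changed: Instead of building a filtered `enabled` dict, checking its emptiness and running all() over its values, B collapses the per-service values into the SET of distinct statuses and decides health by set algebra: the status set must intersect {running, available} and be a subset of {disabled, running, available}.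
import Mathlib
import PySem

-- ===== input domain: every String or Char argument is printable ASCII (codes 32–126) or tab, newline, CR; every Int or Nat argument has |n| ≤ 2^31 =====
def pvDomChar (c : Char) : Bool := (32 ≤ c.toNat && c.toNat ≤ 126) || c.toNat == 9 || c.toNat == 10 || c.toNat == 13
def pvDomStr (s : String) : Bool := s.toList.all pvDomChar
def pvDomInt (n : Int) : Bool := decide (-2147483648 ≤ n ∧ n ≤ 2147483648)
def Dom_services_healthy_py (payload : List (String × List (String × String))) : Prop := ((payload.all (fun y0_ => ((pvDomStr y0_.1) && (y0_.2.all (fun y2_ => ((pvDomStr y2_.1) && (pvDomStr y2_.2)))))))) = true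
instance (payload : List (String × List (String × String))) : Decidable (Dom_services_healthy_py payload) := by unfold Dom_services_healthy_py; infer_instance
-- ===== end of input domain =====

-- B decides health by set algebra on the distinct statuses (intersect {running,available} and subset of {disabled,running,available}) instead of A's filtered dict + emptiness check + all(); simpler, same cost.


-- ===== PORT A =====
-- A: look up "services", require it non-empty, build the `enabled` dict comprehension
-- (sequential insertion = Dict.ofList of the filtered items), require it non-empty,
-- then all(enabled.values() in ("running","available")).
def services_healthy_py (payload : List (String × List (String × String))) : Bool :=
  match (PySem.Dict.ofList payload).get? "services" with
  | none => false
  | some svc =>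
    let sdict := PySem.Dict.ofList svc
    if sdict.items.isEmpty then false
    else
      let enabled := PySem.Dict.ofList (sdict.items.filter (fun kv => !(kv.2 == "disabled")))
      if enabled.items.isEmpty then false
      else enabled.values.all (fun v => v == "running" || v == "available")

-- ===== PORT B =====
-- B: same two guards, then the SET of distinct statuses:
-- bool(statuses & {"running","available"}) and statuses <= {"disabled","running","available"}.
def services_healthy_py_alt (payload : List (String × List (String × String))) : Bool :=
  match (PySem.Dict.ofList payload).get? "services" with
  | none => false
  | some svc =>
    let sdict := PySem.Dict.ofList svc
    if sdict.items.isEmpty then false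
    else
      let statuses : PySem.Set String := PySem.Set.ofList sdict.values
      !(PySem.Set.inter statuses (PySem.Set.ofList ["running", "available"])).isEmpty
        && PySem.Set.issubset statuses (PySem.Set.ofList ["disabled", "running", "available"])

-- ===== PRECONDITION & SPEC =====
def Spec_services_healthy_py (payload : List (String × List (String × String))) (out : Bool) : Prop := out = services_healthy_py_alt payload
instance (payload : List (String × List (String × String))) (out : Bool) : Decidable (Spec_services_healthy_py payload out) := by unfold Spec_services_healthy_py; infer_instance

-- ===== CLAIM (what is proved, stated in full; the proofs are below) =====
def Claim_equal_services_healthy_py : Prop := ∀ (payload : List (String × List (String × String))), Dom_services_healthy_py payload → Spec_services_healthy_py payload (services_healthy_py payload)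

-- ===== LEMMAS AND PROOFS =====
-- Building a dict from pairs whose keys are already distinct keeps the pair list as-is.
theorem ofList_items_of_nodup (l : List (String × String)) (h : (l.map Prod.fst).Nodup) :
    (PySem.Dict.ofList l).items = l := by
  have := PySem.Dict.items_foldl_insert_fresh (l := l) (k := Prod.fst) (v := Prod.snd)
    (d := PySem.Dict.empty) (by simp [PySem.Dict.contains_empty]) h
  simpa [PySem.Dict.ofList] using this

-- isEmpty = false means the list has a member.
theorem pv_isEmpty_false_iff {α : Type} (l : List α) : l.isEmpty = false ↔ ∃ x, x ∈ l := by
  cases l <;> simp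

-- The pure list core of the equivalence: A's filter/empty-check/all over the values
-- equals B's two set-algebra tests over the distinct values.
theorem pvSetAlgebra_eq (vs : List String) :
    (if ((vs.filter (fun v => !(v == "disabled"))).isEmpty) then false
     else (vs.filter (fun v => !(v == "disabled"))).all (fun v => v == "running" || v == "available"))
    = (!(PySem.Set.inter (PySem.Set.ofList vs) (PySem.Set.ofList ["running", "available"])).isEmpty
        && PySem.Set.issubset (PySem.Set.ofList vs) (PySem.Set.ofList ["disabled", "running", "available"])) := by
  have hif : ∀ (c : Bool) (x : Bool), (if c then false else x) = (!c && x) := by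
    intro c x; cases c <;> simp
  rw [hif, Bool.eq_iff_iff]
  simp only [Bool.and_eq_true, Bool.not_eq_true', pv_isEmpty_false_iff, List.all_eq_true,
    List.mem_filter, PySem.Set.mem_inter, PySem.Set.mem_ofList, PySem.Set.issubset_iff,
    beq_eq_false_iff_ne, ne_eq, Bool.or_eq_true, beq_iff_eq, List.mem_cons,
    List.not_mem_nil, or_false]
  constructor
  · rintro ⟨⟨x, hxv, hxd⟩, hall⟩
    refine ⟨⟨x, hxv, hall x ⟨hxv, hxd⟩⟩, ?_⟩
    intro y hy
    by_cases h : y = "disabled"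
    · exact Or.inl h
    · exact Or.inr (hall y ⟨hy, h⟩)
  · rintro ⟨⟨x, hxv, hxp⟩, hsub⟩
    have hxd : ¬ x = "disabled" := by rcases hxp with h | h <;> simp [h]
    refine ⟨⟨x, hxv, hxd⟩, ?_⟩
    rintro y ⟨hy, hyd⟩
    rcases hsub y hy with h | h
    · exact absurd h hyd
    · exact h

-- ===== VERDICT (by name: the statement is the Claim_ definition above) =====
theorem services_healthy_py_spec : Claim_equal_services_healthy_py := by
  intro payload _
  unfold Spec_services_healthy_py services_healthy_py services_healthy_py_alt
  cases h : (PySem.Dict.ofList payload).get? "services" with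
  | none => rfl
  | some svc =>
    simp only []
    set sdict := PySem.Dict.ofList svc with hs
    have hnd : (sdict.items.map Prod.fst).Nodup := by
      have := PySem.Dict.nodup_keys_ofList (ps := svc) (κ := String) (ν := String)
      simpa [PySem.Dict.keys, hs] using this
    have hndf : ((sdict.items.filter (fun kv => !(kv.2 == "disabled"))).map Prod.fst).Nodup :=
      hnd.sublist (List.filter_sublist.map Prod.fst)
    have hitems : (PySem.Dict.ofList (sdict.items.filter (fun kv => !(kv.2 == "disabled")))).items
        = sdict.items.filter (fun kv => !(kv.2 == "disabled")) := ofList_items_of_nodup _ hndf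
    by_cases h1 : sdict.items.isEmpty = true
    · simp only [h1, if_true]
    · rw [if_neg h1, if_neg h1, ← pvSetAlgebra_eq (sdict.values)]
      set enabled := PySem.Dict.ofList (sdict.items.filter (fun kv => !(kv.2 == "disabled"))) with he
      have hvals : sdict.values = sdict.items.map Prod.snd := rfl
      have hfm : (sdict.items.map Prod.snd).filter (fun v => !(v == "disabled"))
          = (sdict.items.filter (fun kv => !(kv.2 == "disabled"))).map Prod.snd := by
        rw [List.filter_map]; rfl
      have hvals2 : enabled.values
          = (sdict.items.filter (fun kv => !(kv.2 == "disabled"))).map Prod.snd := by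
        simp [PySem.Dict.values, hitems]
      have hcond : enabled.items.isEmpty = enabled.values.isEmpty := by
        simp [PySem.Dict.values]
      rw [hvals, hfm, ← hvals2, hcond]
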